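-- pv_equiv track=rewrite | github.com/ajtgjmdjp/jpfin | src/jpfin/universe.py | _clean_tickers
-- ===== SOURCE A (Python) =====
-- def _clean_tickers(raw: list[str]) -> list[str]:
--     """Strip whitespace, remove comments/blanks, deduplicate, sort."""
--     result: list[str] = []
--     seen: set[str] = set()
--     for t in raw:
--         t = t.strip()
--         if not t or t.startswith("#"):
--             continue
--         # Strip .T suffix if present
--         if t.endswith(".T"):
--             t = t[:-2]
--         if t not in seen:
--             seen.add(t)
--             result.append(t)
--     return sorted(result)
-- ===== SOURCE B (Python) =====
-- def _clean_tickers(raw: list[str]) -> list[str]: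
--     """Clean, then sort, then dedup adjacent duplicates in one pass (no hash set)."""
--     cleaned: list[str] = []
--     for t in raw:
--         t = t.strip()
--         if not t or t.startswith("#"):
--             continue
--         if t.endswith(".T"):
--             t = t[:-2]
--         cleaned.append(t)
--     cleaned.sort()
--     out: list[str] = []
--     for t in cleaned:
--         if not out or out[-1] != t:
--             out.append(t)
--     return out
-- ===== Notes on version B (the rewrite author's own statement) =====
-- stated objective: alternative
-- what changed: Replaces the first-occurrence hash-set dedup followed by a sort with clean, sort, then a single adjacent-duplicate elimination pass over the sorted list (no 'seen' set).
import Mathlib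
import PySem

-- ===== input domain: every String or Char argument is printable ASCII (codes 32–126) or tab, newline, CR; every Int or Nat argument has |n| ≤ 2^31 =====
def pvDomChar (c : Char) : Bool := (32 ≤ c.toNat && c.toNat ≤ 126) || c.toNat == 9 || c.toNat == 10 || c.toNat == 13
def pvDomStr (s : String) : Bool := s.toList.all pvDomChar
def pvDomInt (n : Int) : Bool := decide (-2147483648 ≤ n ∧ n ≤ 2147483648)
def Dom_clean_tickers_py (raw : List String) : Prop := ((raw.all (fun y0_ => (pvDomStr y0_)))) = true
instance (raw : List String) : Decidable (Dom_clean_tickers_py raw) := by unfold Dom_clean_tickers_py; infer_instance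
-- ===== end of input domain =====

-- B cleans, sorts, then removes adjacent duplicates in one pass instead of A's hash-set first-occurrence dedup before sorting (objective: alternative, same cost).

-- ===== PORT A =====
-- shared per-token cleaning (strip; drop blanks and '#'-comments; drop a trailing ".T")
def pvCleanTok (t0 : String) : Option String :=
  let t := PySem.Str.strip t0
  if t = "" ∨ PySem.Str.startswith t "#" then none
  else some (if PySem.Str.endswith t ".T" then PySem.Str.slice t none (some (-2)) else t)

def clean_tickers_py (raw : List String) : List String :=
  PySem.List.sorted
    (raw.foldl
      (fun (acc : List String × PySem.Set String) t0 =>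
        match pvCleanTok t0 with
        | none => acc
        | some t =>
          if PySem.Set.contains acc.2 t then acc
          else (acc.1 ++ [t], PySem.Set.add acc.2 t))
      ([], PySem.Set.empty)).1
    (fun x => x) false

-- ===== PORT B =====
def clean_tickers_py_alt (raw : List String) : List String :=
  (PySem.List.sorted
      (raw.foldl
        (fun acc t0 =>
          match pvCleanTok t0 with
          | none => acc
          | some t => acc ++ [t]) [])
      (fun x => x) false).foldl
    (fun out t => if out = [] ∨ out.getLast? ≠ some t then out ++ [t] else out) []

-- ===== PRECONDITION & SPEC =====
def Spec_clean_tickers_py (raw : List String) (out : List String) : Prop := out = clean_tickers_py_alt raw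
instance (raw : List String) (out : List String) : Decidable (Spec_clean_tickers_py raw out) := by unfold Spec_clean_tickers_py; infer_instance

-- ===== CLAIM (what is proved, stated in full; the proofs are below) =====
def Claim_equal_clean_tickers_py : Prop := ∀ (raw : List String), Dom_clean_tickers_py raw → Spec_clean_tickers_py raw (clean_tickers_py raw)

-- ===== LEMMAS AND PROOFS =====

-- recursive form of B's adjacent-dedup loop
def pvGo (prev : String) : List String → List String
  | [] => []
  | y :: ys => if y = prev then pvGo prev ys else y :: pvGo y ys

lemma pvFoldl_go (xs : List String) : ∀ (out : List String) (l : String),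
    out.getLast? = some l →
    xs.foldl (fun out t => if out = [] ∨ out.getLast? ≠ some t then out ++ [t] else out) out
      = out ++ pvGo l xs := by
  induction xs with
  | nil => intro out l h; simp [pvGo]
  | cons y ys ih =>
    intro out l h
    have hne : out ≠ [] := by intro he; rw [he] at h; simp at h
    by_cases hyl : y = l
    · subst hyl
      rw [List.foldl_cons, if_neg (by simp [hne, h]),
        show pvGo y (y :: ys) = pvGo y ys from by rw [pvGo, if_pos rfl]]
      exact ih out y h
    · rw [List.foldl_cons, if_pos (by right; simp [h]; exact fun e => hyl e.symm),
        show pvGo l (y :: ys) = y :: pvGo y ys from by rw [pvGo, if_neg hyl],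
        ih (out ++ [y]) y (by simp)]
      simp
lemma pvFoldl_adj (xs : List String) :
    xs.foldl (fun out t => if out = [] ∨ out.getLast? ≠ some t then out ++ [t] else out) []
      = match xs with | [] => [] | x :: r => x :: pvGo x r := by
  cases xs with
  | nil => rfl
  | cons x r =>
    rw [List.foldl_cons, if_pos (Or.inl rfl)]
    simpa using pvFoldl_go r [x] x rfl

lemma pvGo_mem (xs : List String) : ∀ (prev y : String),
    (y ∈ prev :: pvGo prev xs ↔ y ∈ prev :: xs) := by
  induction xs with
  | nil => intro prev y; simp [pvGo]
  | cons z zs ih =>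
    intro prev y
    by_cases hz : z = prev
    · subst hz
      rw [show pvGo z (z :: zs) = pvGo z zs from by rw [pvGo, if_pos rfl], ih z y]
      simp
    · rw [show pvGo prev (z :: zs) = z :: pvGo z zs from by rw [pvGo, if_neg hz]]
      constructor
      · intro h
        rcases List.mem_cons.1 h with h | h
        · simp [h]
        · have := (ih z y).1 h
          simp at this ⊢; tauto
      · intro h
        simp at h
        rcases h with h | h | h
        · simp [h]
        · have : y ∈ z :: pvGo z zs := (ih z y).2 (by simp [h])
          simp at this ⊢; tauto
        · have : y ∈ z :: pvGo z zs := (ih z y).2 (by simp [h])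
          simp at this ⊢; tauto

lemma pvGo_pairwise (xs : List String) : ∀ (prev : String),
    (prev :: xs).Pairwise (· ≤ ·) → (prev :: pvGo prev xs).Pairwise (· < ·) := by
  induction xs with
  | nil => intro prev _; simp [pvGo]
  | cons z zs ih =>
    intro prev hp
    rcases List.pairwise_cons.1 hp with ⟨hle, hrest⟩
    by_cases hz : z = prev
    · subst hz
      rw [show pvGo z (z :: zs) = pvGo z zs from by rw [pvGo, if_pos rfl]]
      exact ih z hrest
    · rw [show pvGo prev (z :: zs) = z :: pvGo z zs from by rw [pvGo, if_neg hz]]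
      have hlt : prev < z := lt_of_le_of_ne (hle z (by simp)) (fun e => hz e.symm)
      refine List.pairwise_cons.2 ⟨?_, ih z hrest⟩
      intro y hy
      have hy' : y ∈ z :: zs := (pvGo_mem zs z y).1 hy
      have : z ≤ y := by
        rcases List.mem_cons.1 hy' with h | h
        · exact le_of_eq h.symm
        · exact (List.pairwise_cons.1 hrest).1 y h
      exact lt_of_lt_of_le hlt this

-- A's fold with invariant: the result list always equals the seen set's element list
lemma pvFoldA (raw : List String) : ∀ (s : List String),
    raw.foldl
      (fun (acc : List String × PySem.Set String) t0 =>
        match pvCleanTok t0 with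
        | none => acc
        | some t =>
          if PySem.Set.contains acc.2 t then acc
          else (acc.1 ++ [t], PySem.Set.add acc.2 t))
      (s, s)
    = ((raw.filterMap pvCleanTok).foldl PySem.Set.add s,
       (raw.filterMap pvCleanTok).foldl PySem.Set.add s) := by
  induction raw with
  | nil => intro s; rfl
  | cons a r ih =>
    intro s
    cases h : pvCleanTok a with
    | none =>
      simp only [List.foldl_cons, List.filterMap_cons, h]
      exact ih s
    | some t =>
      simp only [List.foldl_cons, List.filterMap_cons, h]
      by_cases hc : PySem.Set.contains s t = true
      · rw [if_pos hc]
        have hst : PySem.Set.add s t = s := by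
          unfold PySem.Set.add; rw [if_pos hc]
        rw [hst]; exact ih s
      · rw [if_neg hc]
        have hst : s ++ [t] = PySem.Set.add s t := by
          unfold PySem.Set.add; rw [if_neg hc]
        rw [hst]
        exact ih (PySem.Set.add s t)

lemma pvFoldB (raw : List String) : ∀ (acc : List String),
    raw.foldl
      (fun acc t0 =>
        match pvCleanTok t0 with
        | none => acc
        | some t => acc ++ [t]) acc
    = acc ++ raw.filterMap pvCleanTok := by
  induction raw with
  | nil => intro acc; simp
  | cons a r ih =>
    intro acc
    cases h : pvCleanTok a with
    | none => simp only [List.foldl_cons, List.filterMap_cons, h, ih]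
    | some t => simp only [List.foldl_cons, List.filterMap_cons, h, ih]; simp

-- ===== VERDICT (by name: the statement is the Claim_ definition above) =====
theorem clean_tickers_py_spec : Claim_equal_clean_tickers_py := by
  intro raw _
  unfold Spec_clean_tickers_py clean_tickers_py clean_tickers_py_alt
  rw [show (([], PySem.Set.empty) : List String × PySem.Set String)
        = (PySem.Set.empty, PySem.Set.empty) from rfl]
  rw [pvFoldA raw PySem.Set.empty, pvFoldB raw []]
  simp only [List.nil_append]
  set L := raw.filterMap pvCleanTok with hL
  rw [show L.foldl PySem.Set.add PySem.Set.empty = PySem.Set.ofList L from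
      (PySem.Set.ofList_eq_foldl L).symm]
  rw [pvFoldl_adj]
  cases hs : PySem.List.sorted L (fun x => x) false with
  | nil =>
    have : L = [] := (PySem.List.sorted_eq_nil_iff L (fun x => x) false).1 hs
    rw [show PySem.Set.ofList L = [] from by rw [this]; rfl]
    exact (PySem.List.sorted_eq_nil_iff [] (fun x => x) false).2 rfl
  | cons x r =>
    have hpw : (x :: r).Pairwise (· ≤ ·) := by
      have := PySem.List.sorted_pairwise (xs := L) (key := fun x => x)
      rw [hs] at this; exact this
    have hperm : (x :: pvGo x r).Perm (PySem.Set.ofList L) := by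
      rw [List.perm_ext_iff_of_nodup ((pvGo_pairwise r x hpw).imp ne_of_lt)
           (PySem.Set.nodup_ofList L)]
      intro a
      rw [pvGo_mem r x a, PySem.Set.mem_ofList]
      rw [← hs]; exact PySem.List.mem_sorted L (fun x : String => x) false a
    show (PySem.List.sorted (PySem.Set.ofList L) (fun x => x) false) = x :: pvGo x r
    exact (PySem.List.sorted_eq_of_perm_of_pairwise_lt (PySem.Set.ofList L) (x :: pvGo x r) (fun x : String => x) hperm (pvGo_pairwise r x hpw))
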